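-- pv_equiv track=rewrite | github.com/marticardoso/AMMM.Project | BRKGA/Utils/Checks.py | CheckMaxConsecutiveHours
-- ===== SOURCE A (Python) =====
-- def CheckMaxConsecutiveHours(schedule, maxConsec):
--     consec = 0
--     for i in range(len(schedule)):
--         if schedule[i] == 1:
--             consec += 1
--             if consec > maxConsec:
--                 return False
--         else:
--             consec = 0
--     return True
-- ===== SOURCE B (Python) =====
-- def CheckMaxConsecutiveHours(schedule, maxConsec):
--     # Prefix-sum reformulation: precompute prefix[i] = number of 1s among the
--     # first i slots; the schedule is valid iff no window of k = max(maxConsec,0)+1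
--     # consecutive slots contains k ones (i.e. is all 1s).
--     k = max(maxConsec, 0) + 1
--     prefix = [0]
--     for x in schedule:
--         prefix.append(prefix[-1] + (1 if x == 1 else 0))
--     return not any(prefix[i + k] - prefix[i] == k
--                    for i in range(len(schedule) - k + 1))
-- ===== Notes on version B (the rewrite author's own statement) =====
-- stated objective: alternative
-- what changed: Replaces A's running counter with early return by a staged prefix-sum computation plus a sliding-window existence check: the schedule is valid iff no window of max(maxConsec,0)+1 consecutive slots contains that many ones.
import Mathlib
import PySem

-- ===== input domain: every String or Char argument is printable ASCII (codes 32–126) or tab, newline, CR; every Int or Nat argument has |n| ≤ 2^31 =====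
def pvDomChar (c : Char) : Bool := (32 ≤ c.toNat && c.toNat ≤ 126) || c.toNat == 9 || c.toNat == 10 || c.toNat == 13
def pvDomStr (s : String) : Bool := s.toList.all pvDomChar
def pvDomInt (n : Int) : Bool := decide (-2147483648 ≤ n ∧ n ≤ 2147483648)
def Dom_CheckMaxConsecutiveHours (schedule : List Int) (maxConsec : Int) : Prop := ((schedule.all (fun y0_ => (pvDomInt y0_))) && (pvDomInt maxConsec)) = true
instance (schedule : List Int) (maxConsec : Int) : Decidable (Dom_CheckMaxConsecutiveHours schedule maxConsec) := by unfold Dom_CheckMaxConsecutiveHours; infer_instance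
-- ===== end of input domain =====

-- B replaces A's running counter (with early return) by a staged prefix-sum pass
-- plus a sliding-window check: valid iff no window of k = max(maxConsec,0)+1
-- consecutive slots contains k ones.

-- ===== PORT A =====
-- A's for-loop with its running counter `consec` and early `return False`
def pvLoopA (maxConsec : Int) : List Int → Int → Bool
  | [], _ => true
  | x :: rest, consec =>
    if x = 1 then
      if consec + 1 > maxConsec then false
      else pvLoopA maxConsec rest (consec + 1)
    else pvLoopA maxConsec rest 0

def CheckMaxConsecutiveHours (schedule : List Int) (maxConsec : Int) : Bool :=
  pvLoopA maxConsec schedule 0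

-- ===== PORT B =====
-- k = max(maxConsec, 0) + 1; prefix = [0]; for x in schedule: prefix.append(prefix[-1] + (1 if x == 1 else 0));
-- not any(prefix[i + k] - prefix[i] == k for i in range(len(schedule) - k + 1))
def CheckMaxConsecutiveHours_alt (schedule : List Int) (maxConsec : Int) : Bool :=
  let k : Int := max maxConsec 0 + 1
  let pvpre : List Int :=
    schedule.foldl (fun p x => p ++ [p.getLastD 0 + (if x = 1 then 1 else 0)]) [0]
  !((PySem.List.pyRange 0 ((schedule.length : Int) - k + 1) 1).any fun i =>
      PySem.List.pyGetD pvpre (i + k) 0 - PySem.List.pyGetD pvpre i 0 == k)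

-- ===== PRECONDITION & SPEC =====
def Spec_CheckMaxConsecutiveHours (schedule : List Int) (maxConsec : Int) (out : Bool) : Prop := out = CheckMaxConsecutiveHours_alt schedule maxConsec
instance (schedule : List Int) (maxConsec : Int) (out : Bool) : Decidable (Spec_CheckMaxConsecutiveHours schedule maxConsec out) := by unfold Spec_CheckMaxConsecutiveHours; infer_instance

-- ===== CLAIM (what is proved, stated in full; the proofs are below) =====
def Claim_equal_CheckMaxConsecutiveHours : Prop := ∀ (schedule : List Int) (maxConsec : Int), Dom_CheckMaxConsecutiveHours schedule maxConsec → Spec_CheckMaxConsecutiveHours schedule maxConsec (CheckMaxConsecutiveHours schedule maxConsec)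

-- ===== LEMMAS AND PROOFS =====

-- the forbidden pattern: a run of K = (max m 0).toNat + 1 consecutive ones
def pvRep (m : Int) : List Int := List.replicate ((max m 0).toNat + 1) 1

theorem pvRep_ne_nil (m : Int) : pvRep m ≠ [] := by
  simp [pvRep]

-- a nonempty all-ones list longer than m contains the forbidden pattern as a prefix
theorem pvRep_prefix_of_ones (m : Int) (t : List Int) (ht : ∀ y ∈ t, y = (1:Int))
    (hne : t ≠ []) (hgt : (t.length : Int) > m) : pvRep m <+: t := by
  have h1 : 1 ≤ t.length := List.length_pos_iff.mpr hne
  have hK : (max m 0).toNat + 1 ≤ t.length := by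
    rcases le_or_gt m 0 with hm | hm
    · have : (max m 0).toNat = 0 := by omega
      omega
    · have : (max m 0).toNat = m.toNat := by omega
      omega
  refine ⟨List.replicate (t.length - ((max m 0).toNat + 1)) 1, ?_⟩
  rw [pvRep, ← List.replicate_add]
  exact (List.eq_replicate_iff.mpr ⟨by omega, ht⟩).symm

-- characterisation of A's loop: starting from a legal counter value c, it fails iff
-- either the leading ones together with c overflow, or the pattern occurs later
theorem pvLoopA_char (m : Int) : ∀ (s : List Int) (c : Int), 0 ≤ c → c ≤ max m 0 →
    (pvLoopA m s c = false ↔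
      (∃ t : List Int, t <+: s ∧ (∀ y ∈ t, y = (1:Int)) ∧ t ≠ [] ∧ (c + t.length : Int) > m)
      ∨ pvRep m <:+: s) := by
  intro s
  induction s with
  | nil =>
    intro c _ _
    simp [pvLoopA, List.infix_nil, pvRep_ne_nil m]
  | cons x xs ih =>
    intro c hc0 hcm
    by_cases hx : x = 1
    · subst hx
      by_cases h1 : c + 1 > m
      · simp only [pvLoopA, if_true, if_pos h1]
        constructor
        · intro _
          exact Or.inl ⟨[1], ⟨xs, rfl⟩, by simp, by simp, by simpa using h1⟩
        · intro _; trivial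
      · have hm1 : c + 1 ≤ m := by omega
        have hmax : max m 0 = m := by omega
        simp only [pvLoopA, if_true, if_neg h1]
        rw [ih (c + 1) (by omega) (by omega)]
        constructor
        · rintro (⟨t, ⟨r, hr⟩, hones, hne, hgt⟩ | hinf)
          · refine Or.inl ⟨1 :: t, ⟨r, by rw [← hr]; rfl⟩, ?_, by simp, ?_⟩
            · intro y hy
              rcases List.mem_cons.mp hy with h | h
              · exact h
              · exact hones y h
            · simp only [List.length_cons]
              push_cast at hgt ⊢
              omega
          · exact Or.inr (List.infix_cons hinf)
        · rintro (⟨t, hpre, hones, hne, hgt⟩ | hinf)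
          · match t, hne with
            | a :: t', _ =>
              obtain ⟨r, hr⟩ := hpre
              have hpre' : t' <+: xs := ⟨r, by
                have := congrArg List.tail hr
                simpa using this⟩
              by_cases ht'nil : t' = []
              · exfalso; subst ht'nil; simp at hgt; omega
              · exact Or.inl ⟨t', hpre',
                  fun y hy => hones y (List.mem_cons_of_mem _ hy), ht'nil,
                  by simp only [List.length_cons] at hgt; push_cast at hgt ⊢; omega⟩
          · rcases List.infix_cons_iff.mp hinf with hpre | hinf'
            · -- pvRep is a prefix of 1 :: xs, so its tail (all ones, length m.toNat) prefixes xs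
              have hmpos : (1:Int) ≤ m := by omega
              have hKe : (max m 0).toNat + 1 = m.toNat + 1 := by omega
              obtain ⟨r, hr⟩ := hpre
              rw [pvRep, hKe] at hr
              have hr' : List.replicate m.toNat (1:Int) ++ r = xs := by
                have := congrArg List.tail hr
                simpa [List.replicate_succ] using this
              refine Or.inl ⟨List.replicate m.toNat 1, ⟨r, hr'⟩,
                fun y hy => (List.eq_of_mem_replicate hy), ?_, ?_⟩
              · intro hnil
                have := congrArg List.length hnil
                simp at this
                omega
              · simp only [List.length_replicate]
                omega
            · exact Or.inr hinf'
    · simp only [pvLoopA, if_neg hx]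
      rw [ih 0 le_rfl (by omega)]
      constructor
      · rintro (⟨t, hpre, hones, hne, hgt⟩ | hinf)
        · have hrep : pvRep m <+: t :=
            pvRep_prefix_of_ones m t hones hne (by omega)
          exact Or.inr (List.infix_cons (hrep.isInfix.trans hpre.isInfix))
        · exact Or.inr (List.infix_cons hinf)
      · rintro (⟨t, hpre, hones, hne, hgt⟩ | hinf)
        · match t, hne with
          | a :: t', _ =>
            obtain ⟨r, hr⟩ := hpre
            have ha : a = x := by
              have := congrArg (List.head? ·) hr
              simpa using this
            exact absurd (ha ▸ hones a (List.mem_cons_self ..)) hx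
        · rcases List.infix_cons_iff.mp hinf with hpre | hinf'
          · obtain ⟨r, hr⟩ := hpre
            have hx1 : x = 1 := by
              have h2 := congrArg (List.head? ·) hr
              simp [pvRep, List.replicate_succ] at h2
              omega
            exact absurd hx1 hx
          · exact Or.inr hinf'

-- A fails from counter 0 exactly when the forbidden pattern occurs
theorem pvLoopA_zero_char (m : Int) (s : List Int) :
    pvLoopA m s 0 = false ↔ pvRep m <:+: s := by
  rw [pvLoopA_char m s 0 le_rfl (by omega)]
  constructor
  · rintro (⟨t, hpre, hones, hne, hgt⟩ | hinf)
    · exact (pvRep_prefix_of_ones m t hones hne (by omega)).isInfix.trans hpre.isInfix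
    · exact hinf
  · exact Or.inr

-- B's first pass: the prefix list accumulated so far, characterised in closed form
theorem pvPrefix_fold (s : List Int) : ∀ acc : List Int,
    s.foldl (fun p x => p ++ [p.getLastD 0 + (if x = 1 then (1:Int) else 0)]) acc
      = acc ++ (List.range s.length).map
          (fun j => acc.getLastD 0 + (((s.take (j+1)).countP (fun y => y == 1) : Nat) : Int)) := by
  induction s with
  | nil => intro acc; simp
  | cons x s ih =>
    intro acc
    rw [List.foldl_cons, ih, List.length_cons, List.range_succ_eq_map]
    rw [List.getLastD_concat, List.map_cons, List.map_map, List.append_assoc,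
      List.singleton_append]
    congr 1
    congr 1
    · by_cases hx : x = 1 <;> simp [hx]
    · apply List.map_congr_left
      intro j _
      simp only [Function.comp]
      rw [List.take_succ_cons, List.countP_cons]
      by_cases hx : x = 1 <;> simp [hx] <;> ring

-- the prefix list indexed at 0 ≤ i ≤ n counts the ones among the first i slots
theorem pvPrefix_getD (s : List Int) (i : Int) (h0 : 0 ≤ i) (hn : i ≤ (s.length : Int)) :
    PySem.List.pyGetD
        (s.foldl (fun p x => p ++ [p.getLastD 0 + (if x = 1 then (1:Int) else 0)]) [0]) i 0
      = (((s.take i.toNat).countP (fun y => y == 1) : Nat) : Int) := by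
  rw [pvPrefix_fold]
  have hi : i = ((i.toNat : Nat) : Int) := (Int.toNat_of_nonneg h0).symm
  rw [hi, PySem.List.pyGetD_natCast]
  cases hiN : i.toNat with
  | zero => simp
  | succ j =>
    have hj : j < s.length := by omega
    simp [List.getD, hj]

-- B's window test succeeds at some admissible index exactly when the pattern occurs
theorem pvAlt_any_char (m : Int) (s : List Int) :
    ((PySem.List.pyRange 0 ((s.length : Int) - (max m 0 + 1) + 1) 1).any fun i =>
      PySem.List.pyGetD
          (s.foldl (fun p x => p ++ [p.getLastD 0 + (if x = 1 then (1:Int) else 0)]) [0])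
          (i + (max m 0 + 1)) 0
        - PySem.List.pyGetD
          (s.foldl (fun p x => p ++ [p.getLastD 0 + (if x = 1 then (1:Int) else 0)]) [0]) i 0
        == max m 0 + 1) = true
    ↔ pvRep m <:+: s := by
  set K : Nat := (max m 0).toNat + 1 with hKdef
  have hKI : ((K : Nat) : Int) = max m 0 + 1 := by
    rw [hKdef]; push_cast; omega
  rw [List.any_eq_true]
  constructor
  · rintro ⟨i, hi, hcond⟩
    rw [PySem.List.mem_pyRange_one] at hi
    obtain ⟨hi0, hilt⟩ := hi
    have hik : i + (max m 0 + 1) ≤ (s.length : Int) := by omega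
    rw [pvPrefix_getD s i hi0 (by omega), pvPrefix_getD s _ (by omega) hik] at hcond
    have htoNat : (i + (max m 0 + 1)).toNat = i.toNat + K := by omega
    rw [htoNat, List.take_add, List.countP_append] at hcond
    have hcnt : ((s.drop i.toNat).take K).countP (fun y => y == 1) = K := by
      have := beq_iff_eq.mp hcond
      omega
    have hlen : ((s.drop i.toNat).take K).length = K := by
      simp only [List.length_take, List.length_drop]
      omega
    have hall : ∀ y ∈ (s.drop i.toNat).take K, y = (1:Int) := by
      have h := (List.countP_eq_length ..).mp (hcnt.trans hlen.symm)
      intro y hy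
      simpa using h y hy
    have heq : (s.drop i.toNat).take K = pvRep m := by
      rw [pvRep, ← hKdef]
      exact List.eq_replicate_iff.mpr ⟨hlen, hall⟩
    rw [← heq]
    exact ((s.drop i.toNat).take_prefix K).isInfix.trans (s.drop_suffix i.toNat).isInfix
  · rintro ⟨l₁, l₂, hs⟩
    have hlenS : s.length = l₁.length + K + l₂.length := by
      subst hs
      simp [pvRep, hKdef]
      omega
    refine ⟨(l₁.length : Int), ?_, ?_⟩
    · rw [PySem.List.mem_pyRange_one]
      omega
    · have hwin : s.drop l₁.length = pvRep m ++ l₂ := by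
        subst hs
        rw [List.append_assoc]
        exact List.drop_left ..
      have htoNat : ((l₁.length : Int) + (max m 0 + 1)).toNat = l₁.length + K := by omega
      rw [pvPrefix_getD s _ (by omega) (by omega),
        pvPrefix_getD s _ (by omega) (by omega : (l₁.length : Int) ≤ (s.length : Int))]
      rw [htoNat, Int.toNat_natCast, List.take_add, List.countP_append]
      have htake : (s.drop l₁.length).take K = pvRep m := by
        rw [hwin]
        have hlr : (pvRep m).length = K := by simp [pvRep, hKdef]
        rw [← hlr]
        exact List.take_left ..
      have hcnt : ((s.drop l₁.length).take K).countP (fun y => y == 1) = K := by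
        rw [htake]
        have h : (pvRep m).countP (fun y => y == 1) = (pvRep m).length :=
          (List.countP_eq_length ..).mpr (fun a ha => by
            rw [pvRep, List.mem_replicate] at ha
            simp [ha.2])
        rw [h]
        simp [pvRep, hKdef]
      rw [hcnt]
      simp only [beq_iff_eq]
      push_cast
      omega

-- ===== VERDICT (by name: the statement is the Claim_ definition above) =====
theorem CheckMaxConsecutiveHours_spec : Claim_equal_CheckMaxConsecutiveHours := by
  intro schedule maxConsec _
  unfold Spec_CheckMaxConsecutiveHours CheckMaxConsecutiveHours CheckMaxConsecutiveHours_alt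
  show pvLoopA maxConsec schedule 0 =
    !((PySem.List.pyRange 0 ((schedule.length : Int) - (max maxConsec 0 + 1) + 1) 1).any fun i =>
      PySem.List.pyGetD
          (schedule.foldl (fun p x => p ++ [p.getLastD 0 + (if x = 1 then (1:Int) else 0)]) [0])
          (i + (max maxConsec 0 + 1)) 0
        - PySem.List.pyGetD
          (schedule.foldl (fun p x => p ++ [p.getLastD 0 + (if x = 1 then (1:Int) else 0)]) [0]) i 0
        == max maxConsec 0 + 1)
  by_cases hinf : pvRep maxConsec <:+: schedule
  · rw [(pvLoopA_zero_char maxConsec schedule).mpr hinf,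
      (pvAlt_any_char maxConsec schedule).mpr hinf]
    rfl
  · have h1 : pvLoopA maxConsec schedule 0 = true := by
      cases hb : pvLoopA maxConsec schedule 0 with
      | true => rfl
      | false => exact absurd ((pvLoopA_zero_char maxConsec schedule).mp hb) hinf
    have h2 : ((PySem.List.pyRange 0 ((schedule.length : Int) - (max maxConsec 0 + 1) + 1) 1).any fun i =>
      PySem.List.pyGetD
          (schedule.foldl (fun p x => p ++ [p.getLastD 0 + (if x = 1 then (1:Int) else 0)]) [0])
          (i + (max maxConsec 0 + 1)) 0
        - PySem.List.pyGetD
          (schedule.foldl (fun p x => p ++ [p.getLastD 0 + (if x = 1 then (1:Int) else 0)]) [0]) i 0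
        == max maxConsec 0 + 1) = false := by
      cases ha : ((PySem.List.pyRange 0 ((schedule.length : Int) - (max maxConsec 0 + 1) + 1) 1).any fun i =>
      PySem.List.pyGetD
          (schedule.foldl (fun p x => p ++ [p.getLastD 0 + (if x = 1 then (1:Int) else 0)]) [0])
          (i + (max maxConsec 0 + 1)) 0
        - PySem.List.pyGetD
          (schedule.foldl (fun p x => p ++ [p.getLastD 0 + (if x = 1 then (1:Int) else 0)]) [0]) i 0
        == max maxConsec 0 + 1) with
      | false => rfl
      | true => exact absurd ((pvAlt_any_char maxConsec schedule).mp ha) hinf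
    rw [h1, h2]
    rfl
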